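-- pv_equiv track=rewrite | github.com/JoJoseph25/NLP_Assignment_17510031 | tom_sawyer_assignment.py | word_freq_descending
-- ===== SOURCE A (Python) =====
-- def inverse_dict(d):
--     invr_dict={}
--     for key in d:
--         check = invr_dict.get(d[key],0)
--         if check==0:
--             invr_dict[d[key]] = [key]
--         else:
--             invr_dict[d[key]].append(key)
--     return invr_dict
--
-- def histogram(word_list):
--     # word_list=list(s.split())
--     word_dict= {}
--     for word in word_list:
--         word_dict[word]= word_dict.get(word,0)+1
--     return word_dict
--
-- def word_freq_descending(L):
--     d1={}
--     for word in L:
--         d1[word] = d1.get(word,0) + 1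
--     inverse_d1= inverse_dict(d1)
--     sorted_freq=list(inverse_d1.keys())
--     sorted_freq.sort()
--     sorted_freq=sorted_freq[::-1]
--     Final_list=[]
--     for freq in sorted_freq:
--         repeat= freq
--         for word in inverse_d1[freq]:
--             for i in range(repeat):
--                 Final_list.append(word)
--     word_dict=histogram(Final_list)
--     return word_dict
-- ===== SOURCE B (Python) =====
-- def word_freq_descending(L):
--     counts = {}
--     for word in L:
--         counts[word] = counts.get(word, 0) + 1
--     return dict(sorted(counts.items(), key=lambda kv: -kv[1]))
-- ===== Notes on version B (the rewrite author's own statement) =====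
-- stated objective: simpler
-- what changed: B counts in one pass and stably sorts counts.items() by descending frequency, replacing A's inverse-index build, ascending freq-sort plus reversal, word-list expansion (each word repeated freq times) and re-histogram.
import Mathlib
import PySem

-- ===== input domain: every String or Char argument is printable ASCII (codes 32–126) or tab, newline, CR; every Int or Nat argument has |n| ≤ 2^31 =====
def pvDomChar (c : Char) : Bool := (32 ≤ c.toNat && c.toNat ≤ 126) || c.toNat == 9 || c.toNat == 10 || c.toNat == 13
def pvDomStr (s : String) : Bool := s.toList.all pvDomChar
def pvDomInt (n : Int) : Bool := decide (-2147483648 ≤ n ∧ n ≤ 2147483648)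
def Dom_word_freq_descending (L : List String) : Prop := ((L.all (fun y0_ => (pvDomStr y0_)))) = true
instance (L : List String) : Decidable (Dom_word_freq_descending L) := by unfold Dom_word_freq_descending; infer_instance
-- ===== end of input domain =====

-- B replaces A's inverse-index build, ascending freq-sort + reversal, word-list expansion and
-- re-histogram by a single count pass followed by one stable sort of the items by descending
-- frequency (objective: simpler).

-- ===== PORT A =====
-- inverse_dict: the 0 returned by invr_dict.get(d[key], 0) is only a sentinel meaning "key absent"
-- (the stored values are lists, never 0), so the check is ported as a match on get?.
def inverse_dict (d : PySem.Dict String Int) : PySem.Dict Int (List String) :=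
  d.keys.foldl (fun invr key =>
    match invr.get? (d.getD key 0) with
    | none => invr.insert (d.getD key 0) [key]
    | some ws => invr.insert (d.getD key 0) (ws ++ [key])) PySem.Dict.empty

def histogram (word_list : List String) : PySem.Dict String Int :=
  word_list.foldl (fun word_dict word => word_dict.insert word (word_dict.getD word 0 + 1))
    PySem.Dict.empty

def word_freq_descending (L : List String) : List (String × Int) :=
  let d1 := L.foldl (fun d word => d.insert word (d.getD word 0 + 1)) PySem.Dict.empty
  let inverse_d1 := inverse_dict d1
  let sorted_freq := PySem.List.sorted inverse_d1.keys (fun x => x)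
  let sorted_freq := (PySem.List.slice? sorted_freq none none (-1)).getD []   -- [::-1]; step ≠ 0 so never none
  let final_list := sorted_freq.foldl (fun acc freq =>
      (inverse_d1.getD freq []).foldl (fun acc word =>
        (PySem.List.pyRange 0 freq 1).foldl (fun acc _ => acc ++ [word]) acc) acc) []
  (histogram final_list).items

-- ===== PORT B =====
def word_freq_descending_alt (L : List String) : List (String × Int) :=
  let counts := L.foldl (fun d word => d.insert word (d.getD word 0 + 1)) PySem.Dict.empty
  (PySem.Dict.ofList (PySem.List.sorted counts.items (fun kv => -kv.2))).items

-- ===== PRECONDITION & SPEC =====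
def Spec_word_freq_descending (L : List String) (out : List (String × Int)) : Prop := out = word_freq_descending_alt L
instance (L : List String) (out : List (String × Int)) : Decidable (Spec_word_freq_descending L out) := by unfold Spec_word_freq_descending; infer_instance

-- ===== CLAIM (what is proved, stated in full; the proofs are below) =====
def Claim_equal_word_freq_descending : Prop := ∀ (L : List String), Dom_word_freq_descending L → Spec_word_freq_descending L (word_freq_descending L)


-- ===== LEMMAS AND PROOFS =====

-- ---- generic facts about PySem.List.insertBy / sorted (stability as group concatenation) ----

theorem insertBy_append_not_before {α : Type} (before : α → α → Bool) (x : α) (l1 l2 : List α)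
    (h1 : ∀ y ∈ l1, before x y = false) :
    PySem.List.insertBy before x (l1 ++ l2) = l1 ++ PySem.List.insertBy before x l2 := by
  induction l1 with
  | nil => simp
  | cons a t ih =>
    have ha := h1 a (List.mem_cons_self)
    simp [PySem.List.insertBy, ha]
    exact ih (fun y hy => h1 y (List.mem_cons_of_mem _ hy))

theorem insertBy_all_before {α : Type} (before : α → α → Bool) (x : α) (l : List α)
    (h : ∀ y ∈ l, before x y = true) :
    PySem.List.insertBy before x l = x :: l := by
  cases l with
  | nil => simp [PySem.List.insertBy]
  | cons y ys => simp [PySem.List.insertBy, h y (List.mem_cons_self)]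

theorem sorted_append_singleton {α : Type} (key : α → Int) (xs : List α) (x : α) :
    PySem.List.sorted (xs ++ [x]) key
      = PySem.List.insertBy (fun a b => decide (key a < key b)) x (PySem.List.sorted xs key) := by
  rw [PySem.List.sorted_eq_foldl_insertBy, PySem.List.sorted_eq_foldl_insertBy, List.foldl_append]
  rfl

/-- extract the minimum key group off a stable sort -/
theorem sorted_filter_min {α : Type} (key : α → Int) (m : Int) :
    ∀ (xs : List α), (∀ a ∈ xs, m ≤ key a) →
      PySem.List.sorted xs key = xs.filter (fun a => key a == m)
        ++ PySem.List.sorted (xs.filter (fun a => key a != m)) key := by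
  intro xs
  induction xs using List.reverseRecOn with
  | nil => intro _; simp [PySem.List.sorted]
  | append_singleton xs x ih =>
    intro h
    have hxs : ∀ a ∈ xs, m ≤ key a := fun a ha => h a (List.mem_append_left _ ha)
    have hx : m ≤ key x := h x (List.mem_append_right _ (List.mem_cons_self))
    rw [sorted_append_singleton, ih hxs]
    by_cases hk : key x = m
    · rw [insertBy_append_not_before]
      · rw [insertBy_all_before]
        · simp [List.filter_append, hk]
        · intro y hy
          have hy' := (PySem.List.mem_sorted _ _ _ _).mp hy
          have hym : key y ≠ m := by
            have := List.of_mem_filter hy'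
            simpa using this
          have hge : m ≤ key y := hxs y (List.mem_of_mem_filter hy')
          simp [hk]
          omega
      · intro y hy
        have : key y = m := by simpa using List.of_mem_filter hy
        simp [hk, this]
    · have hlt : m < key x := lt_of_le_of_ne hx (Ne.symm hk)
      have hf1 : List.filter (fun a => key a == m) [x] = [] := by simp [hk]
      have hf2 : List.filter (fun a => key a != m) [x] = [x] := by simp [hk]
      rw [List.filter_append, List.filter_append, hf1, hf2, List.append_nil,
        sorted_append_singleton, insertBy_append_not_before]
      intro y hy
      have : key y = m := by simpa using List.of_mem_filter hy
      simp [this]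
      omega

theorem flatMap_congr_mem {α β : Type} (l : List α) (f g : α → List β)
    (h : ∀ x ∈ l, f x = g x) : l.flatMap f = l.flatMap g := by
  induction l with
  | nil => rfl
  | cons a t ih =>
    simp only [List.flatMap_cons]
    rw [h a (List.mem_cons_self), ih (fun x hx => h x (List.mem_cons_of_mem _ hx))]

/-- a stable sort is the concatenation of the key-fibers in increasing key order -/
theorem sorted_eq_flatMap {α : Type} (key : α → Int) :
    ∀ (ks : List Int) (xs : List α), ks.Pairwise (· < ·) →
      (∀ a ∈ xs, key a ∈ ks) → (∀ k ∈ ks, ∃ a ∈ xs, key a = k) →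
      PySem.List.sorted xs key = ks.flatMap (fun k => xs.filter (fun a => key a == k)) := by
  intro ks
  induction ks with
  | nil =>
    intro xs _ hcov _
    cases xs with
    | nil => simp [PySem.List.sorted]
    | cons a t => exact absurd (hcov a (List.mem_cons_self)) (List.not_mem_nil)
  | cons k ks ih =>
    intro xs hpair hcov hne
    have hhead : ∀ k' ∈ ks, k < k' := (List.pairwise_cons.mp hpair).1
    have hmin : ∀ a ∈ xs, k ≤ key a := by
      intro a ha
      rcases List.mem_cons.mp (hcov a ha) with h | h
      · exact le_of_eq h.symm
      · exact le_of_lt (hhead _ h)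
    rw [sorted_filter_min key k xs hmin, List.flatMap_cons]
    congr 1
    rw [ih (xs.filter (fun a => key a != k)) (List.pairwise_cons.mp hpair).2]
    · apply flatMap_congr_mem
      intro k' hk'
      rw [List.filter_filter]
      apply List.filter_congr
      intro a _
      have : k ≠ k' := ne_of_lt (hhead _ hk')
      by_cases h : key a = k'
      · simp [h, this.symm]
      · simp [h]
    · intro a ha
      have h1 := hcov a (List.mem_of_mem_filter ha)
      have h2 : key a ≠ k := by simpa using List.of_mem_filter ha
      rcases List.mem_cons.mp h1 with h | h
      · exact absurd h h2
      · exact h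
    · intro k' hk'
      obtain ⟨a, ha, hak⟩ := hne k' (List.mem_cons_of_mem _ hk')
      refine ⟨a, List.mem_filter.mpr ⟨ha, ?_⟩, hak⟩
      have : k ≠ k' := ne_of_lt (hhead _ hk')
      simp [hak, this.symm]

-- ---- generic facts about the expanded word list (A's Final_list) ----

theorem foldl_append_const {α β : Type} (w : β) :
    ∀ (l : List α) (acc : List β),
      l.foldl (fun a _ => a ++ [w]) acc = acc ++ List.replicate l.length w := by
  intro l
  induction l with
  | nil => simp
  | cons a t ih =>
    intro acc
    simp only [List.foldl_cons, ih, List.length_cons]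
    rw [List.append_assoc, List.singleton_append, ← List.replicate_succ]

theorem ofList_singleton {α : Type} [BEq α] (w : α) : PySem.Set.ofList [w] = [w] := by
  simp [PySem.Set.ofList, PySem.Set.add, PySem.Set.empty, PySem.Set.contains]

theorem ofList_replicate_succ {α : Type} [BEq α] [LawfulBEq α] (w : α) (n : Nat) :
    PySem.Set.ofList (List.replicate (n + 1) w) = [w] := by
  rw [List.replicate_succ, ← List.singleton_append, PySem.Set.ofList_append,
    PySem.Set.update_eq_append_filter, ofList_singleton]
  have : (PySem.Set.ofList (List.replicate n w)).filter
      (fun y => !(PySem.Set.contains [w] y)) = [] := by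
    apply List.filter_eq_nil_iff.mpr
    intro y hy
    have : y = w := List.eq_of_mem_replicate ((PySem.Set.mem_ofList _ _).mp hy)
    simp [this, PySem.Set.contains]
  rw [this]
  simp

theorem ofList_flatMap_replicate {α : Type} [BEq α] [LawfulBEq α] (n : Nat) (hn : 1 ≤ n) :
    ∀ (ws : List α), ws.Nodup →
      PySem.Set.ofList (ws.flatMap (fun w => List.replicate n w)) = ws := by
  intro ws
  induction ws with
  | nil => intro _; rfl
  | cons w t ih =>
    intro hnd
    obtain ⟨hwt, hndt⟩ := List.nodup_cons.mp hnd
    obtain ⟨m, rfl⟩ : ∃ m, n = m + 1 := ⟨n - 1, by omega⟩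
    rw [List.flatMap_cons, PySem.Set.ofList_append, PySem.Set.update_eq_append_filter,
      ofList_replicate_succ, ih hndt]
    have : t.filter (fun y => !(PySem.Set.contains [w] y)) = t := by
      apply List.filter_eq_self.mpr
      intro y hy
      have : y ≠ w := fun h => hwt (h ▸ hy)
      simp [PySem.Set.contains, this]
    rw [this]
    rfl

theorem count_flatMap_replicate_of_not_mem {α : Type} [BEq α] [LawfulBEq α] (n : Nat) (w : α) :
    ∀ (ws : List α), w ∉ ws →
      (ws.flatMap (fun w' => List.replicate n w')).count w = 0 := by
  intro ws
  induction ws with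
  | nil => intro _; rfl
  | cons a t ih =>
    intro hw
    have ha : w ≠ a := fun h => hw (h ▸ List.mem_cons_self)
    have h0 : (List.replicate n a).count w = 0 :=
      List.count_eq_zero.mpr (fun hm => ha (List.eq_of_mem_replicate hm))
    rw [List.flatMap_cons, List.count_append, h0,
      ih (fun h => hw (List.mem_cons_of_mem _ h))]

theorem count_flatMap_replicate_of_mem {α : Type} [BEq α] [LawfulBEq α] (n : Nat) (w : α) :
    ∀ (ws : List α), ws.Nodup → w ∈ ws →
      (ws.flatMap (fun w' => List.replicate n w')).count w = n := by
  intro ws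
  induction ws with
  | nil => intro _ h; exact absurd h (List.not_mem_nil)
  | cons a t ih =>
    intro hnd hw
    obtain ⟨hat, hndt⟩ := List.nodup_cons.mp hnd
    rw [List.flatMap_cons, List.count_append]
    by_cases h : w = a
    · subst h
      rw [count_flatMap_replicate_of_not_mem n w t hat, List.count_replicate_self]
      omega
    · have h0 : (List.replicate n a).count w = 0 :=
        List.count_eq_zero.mpr (fun hm => h (List.eq_of_mem_replicate hm))
      rw [h0, ih hndt ((List.mem_cons.mp hw).resolve_left h)]
      omega

-- ---- the block structure shared by both programs ----

theorem ofList_blocks (W : Int → List String) : ∀ (ds : List Int),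
    (∀ f ∈ ds, 1 ≤ f) → (∀ f ∈ ds, (W f).Nodup) →
    (∀ f ∈ ds, ∀ g ∈ ds, f ≠ g → ∀ w ∈ W f, w ∉ W g) → ds.Nodup →
    PySem.Set.ofList (ds.flatMap (fun f => (W f).flatMap (fun w => List.replicate f.toNat w)))
      = ds.flatMap W := by
  intro ds
  induction ds with
  | nil => intro _ _ _ _; rfl
  | cons f ds ih =>
    intro hpos hnodup hdisj hnd
    obtain ⟨hfds, hndds⟩ := List.nodup_cons.mp hnd
    rw [List.flatMap_cons, PySem.Set.ofList_append, PySem.Set.update_eq_append_filter]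
    have h1 : 1 ≤ f.toNat := by have := hpos f (List.mem_cons_self); omega
    rw [ofList_flatMap_replicate f.toNat h1 (W f) (hnodup f (List.mem_cons_self))]
    have hrest : PySem.Set.ofList (ds.flatMap
        (fun f => (W f).flatMap (fun w => List.replicate f.toNat w))) = ds.flatMap W := by
      apply ih
      · exact fun g hg => hpos g (List.mem_cons_of_mem _ hg)
      · exact fun g hg => hnodup g (List.mem_cons_of_mem _ hg)
      · exact fun g hg g' hg' => hdisj g (List.mem_cons_of_mem _ hg) g' (List.mem_cons_of_mem _ hg')
      · exact hndds
    rw [hrest]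
    have : (ds.flatMap W).filter (fun y => !(PySem.Set.contains (W f) y)) = ds.flatMap W := by
      apply List.filter_eq_self.mpr
      intro y hy
      obtain ⟨g, hg, hyg⟩ := List.mem_flatMap.mp hy
      have hgf : g ≠ f := fun h => hfds (h ▸ hg)
      have : y ∉ W f := hdisj g (List.mem_cons_of_mem _ hg) f (List.mem_cons_self) hgf y hyg
      simp [PySem.Set.contains]
      simpa using this
    rw [this, List.flatMap_cons]

theorem count_blocks_zero (W : Int → List String) (w : String) : ∀ (ds : List Int),
    (∀ g ∈ ds, w ∉ W g) →
    (ds.flatMap (fun f => (W f).flatMap (fun w => List.replicate f.toNat w))).count w = 0 := by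
  intro ds
  induction ds with
  | nil => intro _; rfl
  | cons f ds ih =>
    intro h
    rw [List.flatMap_cons, List.count_append,
      count_flatMap_replicate_of_not_mem _ w _ (h f (List.mem_cons_self)),
      ih (fun g hg => h g (List.mem_cons_of_mem _ hg))]

theorem count_blocks (W : Int → List String) : ∀ (ds : List Int),
    (∀ f ∈ ds, (W f).Nodup) →
    (∀ f ∈ ds, ∀ g ∈ ds, f ≠ g → ∀ w ∈ W f, w ∉ W g) → ds.Nodup →
    ∀ f₀ ∈ ds, ∀ w ∈ W f₀,
    (ds.flatMap (fun f => (W f).flatMap (fun w => List.replicate f.toNat w))).count w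
      = f₀.toNat := by
  intro ds
  induction ds with
  | nil => intro _ _ _ f₀ h; exact absurd h (List.not_mem_nil)
  | cons f ds ih =>
    intro hnodup hdisj hnd f₀ hf₀ w hw
    obtain ⟨hfds, hndds⟩ := List.nodup_cons.mp hnd
    rw [List.flatMap_cons, List.count_append]
    rcases List.mem_cons.mp hf₀ with h | h
    · subst h
      rw [count_flatMap_replicate_of_mem _ w _ (hnodup f₀ (List.mem_cons_self)) hw]
      have : ∀ g ∈ ds, w ∉ W g := by
        intro g hg
        have : g ≠ f₀ := fun he => hfds (he ▸ hg)
        exact hdisj f₀ (List.mem_cons_self) g (List.mem_cons_of_mem _ hg) this.symm w hw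
      rw [count_blocks_zero W w ds this]
      omega
    · have hff₀ : f ≠ f₀ := fun he => hfds (he ▸ h)
      have hwf : w ∉ W f := hdisj f₀ (List.mem_cons_of_mem _ h) f (List.mem_cons_self) hff₀.symm w hw
      rw [count_flatMap_replicate_of_not_mem _ w _ hwf,
        ih (fun g hg => hnodup g (List.mem_cons_of_mem _ hg))
          (fun g hg g' hg' => hdisj g (List.mem_cons_of_mem _ hg) g' (List.mem_cons_of_mem _ hg'))
          hndds f₀ h w hw]
      omega

/-- distinct frequencies of `L`, ascending -/
def ascFreqs (L : List String) : List Int :=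
  PySem.List.sorted (PySem.Set.ofList ((PySem.Dict.counter L).items.map (·.2))) (fun x => x)

/-- the words of `L` (distinct, first-occurrence order) whose count is `f` -/
def wordsOf (L : List String) (f : Int) : List String :=
  (PySem.Set.ofList L).filter (fun w => ((L.count w : Int)) == f)

/-- the common canonical value of both programs -/
def canon (L : List String) : List (String × Int) :=
  (ascFreqs L).reverse.flatMap (fun f => (wordsOf L f).map (fun w => (w, f)))

-- ---- facts about the counter of L, its frequencies and word groups ----

theorem counter_items_eq (L : List String) :
    (PySem.Dict.counter L).items
      = (PySem.Set.ofList L).map (fun w => (w, (L.count w : Int))) := by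
  rw [PySem.Dict.items_counter]

theorem mem_ascFreqs (L : List String) (f : Int) :
    f ∈ ascFreqs L ↔ f ∈ (PySem.Dict.counter L).items.map (·.2) := by
  unfold ascFreqs
  rw [PySem.List.mem_sorted, PySem.Set.mem_ofList]

theorem ascFreqs_pos (L : List String) : ∀ f ∈ ascFreqs L, 1 ≤ f := by
  intro f hf
  have := (mem_ascFreqs L f).mp hf
  rw [counter_items_eq] at this
  simp only [List.map_map, List.mem_map, Function.comp] at this
  obtain ⟨w, hw, rfl⟩ := this
  have hwL : w ∈ L := (PySem.Set.mem_ofList L w).mp hw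
  have : 0 < L.count w := List.count_pos_iff.mpr hwL
  omega

theorem descFreqs_nodup (L : List String) : ((ascFreqs L).reverse).Nodup := by
  rw [List.nodup_reverse]
  exact (PySem.List.sorted_ofList_pairwise_lt _).imp ne_of_lt

theorem wordsOf_nodup (L : List String) (f : Int) : (wordsOf L f).Nodup :=
  (PySem.Set.nodup_ofList L).filter _

theorem wordsOf_disjoint (L : List String) (f g : Int) (hfg : f ≠ g) :
    ∀ w ∈ wordsOf L f, w ∉ wordsOf L g := by
  intro w hwf hwg
  have h1 : ((L.count w : Int)) = f := by simpa using (List.mem_filter.mp hwf).2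
  have h2 : ((L.count w : Int)) = g := by simpa using (List.mem_filter.mp hwg).2
  exact hfg (h1 ▸ h2)

-- ---- the fiber of items over a frequency ----

theorem items_filter_freq (L : List String) (f : Int) :
    (PySem.Dict.counter L).items.filter (fun kv => kv.2 == f)
      = (wordsOf L f).map (fun w => (w, f)) := by
  rw [counter_items_eq]
  unfold wordsOf
  have : ∀ (S : List String),
      (S.map (fun w => (w, (L.count w : Int)))).filter (fun kv => kv.2 == f)
        = (S.filter (fun w => ((L.count w : Int)) == f)).map (fun w => (w, f)) := by
    intro S
    induction S with
    | nil => rfl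
    | cons a t ih =>
      by_cases h : ((L.count a : Int)) = f
      · simp only [List.map_cons, List.filter_cons]
        simp [h, ih]
      · simp only [List.map_cons, List.filter_cons]
        simp [h, ih]
  exact this _

-- ---- A's inverse_dict on the counter ----

theorem inverse_dict_form (L : List String) :
    inverse_dict (PySem.Dict.counter L)
      = ((PySem.Dict.counter L).items.map Prod.swap).foldl
          (fun d p => d.modify p.1 [] (fun v => v ++ [p.2])) PySem.Dict.empty := by
  unfold inverse_dict
  rw [PySem.Dict.items_eq_map_keys _ (PySem.Dict.nodup_keys_counter L) 0, List.map_map,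
    List.foldl_map]
  apply PySem.List.foldl_congr_mem
  intro acc k _
  cases hg : acc.get? ((PySem.Dict.counter L).getD k 0) with
  | none =>
    simp only [PySem.Dict.modify, PySem.Dict.getD_eq_get?_getD, Function.comp_def,
      Prod.swap_prod_mk] at hg ⊢
    rw [hg]
    simp
  | some ws =>
    simp only [PySem.Dict.modify, PySem.Dict.getD_eq_get?_getD, Function.comp_def,
      Prod.swap_prod_mk] at hg ⊢
    rw [hg]
    simp

theorem inverse_dict_getD (L : List String) (f : Int) :
    (inverse_dict (PySem.Dict.counter L)).getD f [] = wordsOf L f := by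
  rw [inverse_dict_form, PySem.Dict.getD_foldl_modify_append, PySem.Dict.getD_empty]
  rw [counter_items_eq, List.map_map]
  unfold wordsOf
  rw [List.filter_map, List.map_map]
  simp only [List.nil_append]
  simp [Function.comp_def]

theorem inverse_dict_keys (L : List String) :
    (inverse_dict (PySem.Dict.counter L)).keys
      = PySem.Set.ofList ((PySem.Dict.counter L).items.map (·.2)) := by
  rw [inverse_dict_form,
    PySem.Dict.keys_foldl_modify_key ((PySem.Dict.counter L).items.map Prod.swap)
      (fun p => p.1) [] (fun d p v => v ++ [p.2]) PySem.Dict.empty]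
  rw [PySem.Dict.keys_empty, PySem.Set.update_nil_left, List.map_map]
  rfl

-- ---- A equals the canonical value ----

theorem A_eq_canon (L : List String) : word_freq_descending L = canon L := by
  unfold word_freq_descending
  rw [PySem.Dict.foldl_insert_getD_add_one_eq_counter]
  simp only [inverse_dict_keys, inverse_dict_getD]
  rw [PySem.List.slice?_none_none_neg_one]
  simp only [Option.getD_some]
  -- the expanded list
  simp only [foldl_append_const, PySem.List.length_pyRange_one, sub_zero]
  simp only [PySem.List.foldl_append_eq_flatMap, List.nil_append]
  -- histogram = counter
  unfold histogram
  rw [PySem.Dict.foldl_insert_getD_add_one_eq_counter, counter_items_eq]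
  have hpos : ∀ f ∈ (ascFreqs L).reverse, 1 ≤ f :=
    fun f hf => ascFreqs_pos L f (List.mem_reverse.mp hf)
  have hnodup : ∀ f ∈ (ascFreqs L).reverse, (wordsOf L f).Nodup := fun f _ => wordsOf_nodup L f
  have hdisj : ∀ f ∈ (ascFreqs L).reverse, ∀ g ∈ (ascFreqs L).reverse, f ≠ g →
      ∀ w ∈ wordsOf L f, w ∉ wordsOf L g := fun f _ g _ hfg => wordsOf_disjoint L f g hfg
  have hnd := descFreqs_nodup L
  have hofl := ofList_blocks (wordsOf L) ((ascFreqs L).reverse) hpos hnodup hdisj hnd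
  have hsorted_eq : PySem.List.sorted
      (PySem.Set.ofList ((PySem.Dict.counter L).items.map (·.2))) (fun x => x) = ascFreqs L := rfl
  rw [hsorted_eq, hofl, List.map_flatMap]
  unfold canon
  apply flatMap_congr_mem
  intro f hf
  apply List.map_congr_left
  intro w hw
  have hcount := count_blocks (wordsOf L) ((ascFreqs L).reverse) hnodup hdisj hnd f hf w hw
  have h1 : 1 ≤ f := hpos f hf
  simp only [hcount]
  congr 1
  omega

-- ---- B equals the canonical value ----

theorem items_ofList_nodup {κ ν : Type} [BEq κ] [LawfulBEq κ] (ps : List (κ × ν))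
    (h : (ps.map (fun p => p.1)).Nodup) : (PySem.Dict.ofList ps).items = ps := by
  have hof : PySem.Dict.ofList ps
      = ps.foldl (fun d p => d.insert p.1 p.2) PySem.Dict.empty := rfl
  have he : (PySem.Dict.empty : PySem.Dict κ ν).items = [] := rfl
  rw [hof, PySem.Dict.items_foldl_insert_fresh ps (fun p => p.1) (fun p => p.2) PySem.Dict.empty
    (fun a _ => PySem.Dict.contains_empty a.1) h, he]
  simp

theorem B_eq_canon (L : List String) : word_freq_descending_alt L = canon L := by
  unfold word_freq_descending_alt
  rw [PySem.Dict.foldl_insert_getD_add_one_eq_counter]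
  -- the dict built from the sorted items has the sorted items as items
  have hkeys : ((PySem.Dict.counter L).items.map (fun p : String × Int => p.1)).Nodup := by
    have : (PySem.Dict.counter L).items.map (fun p : String × Int => p.1)
        = (PySem.Dict.counter L).keys := rfl
    rw [this]
    exact PySem.Dict.nodup_keys_counter L
  have hperm := PySem.List.sorted_perm (PySem.Dict.counter L).items (fun kv : String × Int => -kv.2) false
  have hnodup : ((PySem.List.sorted (PySem.Dict.counter L).items
      (fun kv => -kv.2)).map (fun p => p.1)).Nodup :=
    ((hperm.map (fun p => p.1)).nodup_iff).mpr hkeys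
  rw [items_ofList_nodup _ hnodup]
  -- characterize the stable sort
  have hks : (((ascFreqs L).reverse).map (fun f => -f)).Pairwise (· < ·) := by
    rw [List.pairwise_map]
    rw [List.pairwise_reverse]
    exact (PySem.List.sorted_ofList_pairwise_lt _).imp (fun h => by omega)
  have hcov : ∀ kv ∈ (PySem.Dict.counter L).items,
      (fun kv : String × Int => -kv.2) kv ∈ ((ascFreqs L).reverse).map (fun f => -f) := by
    intro kv hkv
    apply List.mem_map.mpr
    refine ⟨kv.2, ?_, rfl⟩
    rw [List.mem_reverse, mem_ascFreqs]
    exact List.mem_map.mpr ⟨kv, hkv, rfl⟩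
  have hne : ∀ k ∈ ((ascFreqs L).reverse).map (fun f => -f),
      ∃ kv ∈ (PySem.Dict.counter L).items, (fun kv : String × Int => -kv.2) kv = k := by
    intro k hk
    obtain ⟨f, hf, rfl⟩ := List.mem_map.mp hk
    have : f ∈ (PySem.Dict.counter L).items.map (·.2) :=
      (mem_ascFreqs L f).mp (List.mem_reverse.mp hf)
    obtain ⟨kv, hkv, hkv2⟩ := List.mem_map.mp this
    exact ⟨kv, hkv, by simp [hkv2]⟩
  rw [sorted_eq_flatMap (fun kv : String × Int => -kv.2) (((ascFreqs L).reverse).map (fun f => -f))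
    (PySem.Dict.counter L).items hks hcov hne]
  rw [List.flatMap_map]
  unfold canon
  apply flatMap_congr_mem
  intro f _
  have : ((PySem.Dict.counter L).items.filter (fun kv => -kv.2 == -f))
      = (PySem.Dict.counter L).items.filter (fun kv => kv.2 == f) := by
    apply List.filter_congr
    intro kv _
    by_cases h : kv.2 = f
    · simp [h]
    · have h2 : ¬(-kv.2 = -f) := fun hc => h (by omega)
      simp [h, h2]
  rw [this, items_filter_freq]

-- ===== VERDICT (by name: the statement is the Claim_ definition above) =====
theorem word_freq_descending_spec : Claim_equal_word_freq_descending := by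
  intro L _
  unfold Spec_word_freq_descending
  rw [A_eq_canon, B_eq_canon]
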